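-- pv_equiv track=rewrite | github.com/Lacrima98654/TICTACTOE_Python | functions.py | n2ij
-- ===== SOURCE A (Python) =====
-- def n2ij(dimension,n):
--     indice = 0
--
--     if dimension == 3:
--         for i in range(0,3):
--             for j in range(0,3):
--                 if indice == n:
--                     return i,j
--                 indice += 1
--     elif dimension == 4:
--         for i in range(0,4):
--             for j in range(0,4):
--                 if indice == n:
--                     return i,j
--                 indice += 1
--     elif dimension == 5:
--         for i in range(0,5):
--             for j in range(0,5):
--                 if indice == n:
--                     return i,j
--                 indice += 1
-- ===== SOURCE B (Python) =====
-- def n2ij(dimension, n):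
--     if dimension in (3, 4, 5) and 0 <= n < dimension * dimension:
--         return n // dimension, n % dimension
--     return None
-- ===== Notes on version B (the rewrite author's own statement) =====
-- stated objective: simpler
-- what changed: Replaced the nested-loop counter scan with a single range guard and a closed-form divmod (n // dimension, n % dimension).
import Mathlib
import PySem

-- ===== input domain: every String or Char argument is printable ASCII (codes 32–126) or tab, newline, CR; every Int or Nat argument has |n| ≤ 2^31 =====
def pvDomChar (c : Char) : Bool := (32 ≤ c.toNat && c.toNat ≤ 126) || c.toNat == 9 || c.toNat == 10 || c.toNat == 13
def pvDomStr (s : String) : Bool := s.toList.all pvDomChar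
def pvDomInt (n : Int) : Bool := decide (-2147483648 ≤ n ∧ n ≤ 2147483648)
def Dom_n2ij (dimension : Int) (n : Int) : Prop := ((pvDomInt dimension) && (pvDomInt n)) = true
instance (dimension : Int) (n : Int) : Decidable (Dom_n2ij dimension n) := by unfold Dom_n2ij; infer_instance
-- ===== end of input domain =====

-- B replaces A's nested-loop counter scan by a range guard plus closed-form divmod; same return value everywhere.
-- B: the nested-loop counter scan is replaced by a range guard plus closed-form divmod; same return value on every input.
-- ===== PORT A =====
-- the nested for-loops with the running `indice` counter and the early `return i, j`,
-- as a fold over the state (result?, indice); a found result is carried unchanged to the end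
def n2ijScan (d : Int) (n : Int) : Option (Int × Int) :=
  ((PySem.List.pyRange 0 d 1).foldl (fun (st : Option (Int × Int) × Int) i =>
    (PySem.List.pyRange 0 d 1).foldl (fun (st2 : Option (Int × Int) × Int) j =>
      match st2.1 with
      | some _ => st2
      | none => if st2.2 = n then (some (i, j), st2.2) else (none, st2.2 + 1)) st)
    (none, 0)).1

def n2ij (dimension : Int) (n : Int) : Option (Int × Int) :=
  if dimension = 3 then n2ijScan 3 n
  else if dimension = 4 then n2ijScan 4 n
  else if dimension = 5 then n2ijScan 5 n
  else none

-- ===== PORT B =====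
def n2ij_alt (dimension : Int) (n : Int) : Option (Int × Int) :=
  if (dimension = 3 ∨ dimension = 4 ∨ dimension = 5) ∧ (0 ≤ n ∧ n < dimension * dimension) then
    some (PySem.Int.floordiv n dimension, PySem.Int.mod n dimension)
  else none

-- ===== PRECONDITION & SPEC =====
def Spec_n2ij (dimension : Int) (n : Int) (out : Option (Int × Int)) : Prop := out = n2ij_alt dimension n
instance (dimension : Int) (n : Int) (out : Option (Int × Int)) : Decidable (Spec_n2ij dimension n out) := by unfold Spec_n2ij; infer_instance

-- ===== CLAIM (what is proved, stated in full; the proofs are below) =====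
def Claim_equal_n2ij : Prop := ∀ (dimension : Int) (n : Int), Dom_n2ij dimension n → Spec_n2ij dimension n (n2ij dimension n)

-- ===== LEMMAS AND PROOFS =====

-- invariant: starting from (none, c), a fold whose counter never reaches n ends in (none, c + length)
theorem inner_none (n i : Int) (l : List Int) (c : Int)
    (h : n < c ∨ c + l.length ≤ n) :
    l.foldl (fun (st2 : Option (Int × Int) × Int) j =>
      match st2.1 with
      | some _ => st2
      | none => if st2.2 = n then (some (i, j), st2.2) else (none, st2.2 + 1))
      (none, c) = (none, c + l.length) := by
  induction l generalizing c with
  | nil => simp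
  | cons x xs ih =>
    simp only [List.length_cons] at h
    push_cast at h
    have hne : ¬ (c = n) := by omega
    have h' : n < c + 1 ∨ (c + 1) + (xs.length : Int) ≤ n := by omega
    simp only [List.foldl_cons, List.length_cons, if_neg hne]
    rw [ih (c + 1) h']
    congr 1
    push_cast
    ring

theorem outer_none (n : Int) (l rows : List Int) (c : Int)
    (h : n < c ∨ c + rows.length * l.length ≤ n) :
    rows.foldl (fun (st : Option (Int × Int) × Int) i =>
      l.foldl (fun (st2 : Option (Int × Int) × Int) j =>
        match st2.1 with
        | some _ => st2
        | none => if st2.2 = n then (some (i, j), st2.2) else (none, st2.2 + 1)) st)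
      (none, c) = (none, c + rows.length * l.length) := by
  induction rows generalizing c with
  | nil => simp
  | cons r rs ih =>
    simp only [List.length_cons] at h
    push_cast at h
    have hnn : (0:Int) ≤ (rs.length : Int) * l.length := by positivity
    have h1 : n < c ∨ c + (l.length : Int) ≤ n := by
      rcases h with h | h
      · exact Or.inl h
      · right; nlinarith
    have h2 : n < c + l.length ∨ (c + (l.length : Int)) + rs.length * l.length ≤ n := by
      rcases h with h | h
      · left; omega
      · right; nlinarith
    simp only [List.foldl_cons, List.length_cons]
    rw [inner_none n r l c h1, ih (c + l.length) h2]
    congr 1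
    push_cast
    ring

theorem scan_eq (d : Int) (hd : d = 3 ∨ d = 4 ∨ d = 5) (n : Int) :
    n2ijScan d n = if 0 ≤ n ∧ n < d * d then
      some (PySem.Int.floordiv n d, PySem.Int.mod n d) else none := by
  by_cases hn : 0 ≤ n ∧ n < d * d
  · rcases hd with h | h | h <;> subst h <;>
      (obtain ⟨h1, h2⟩ := hn; norm_num at h2; interval_cases n <;> decide)
  · rw [if_neg hn]
    rcases hd with h | h | h <;> subst h <;>
      · unfold n2ijScan
        rw [outer_none _ _ _ _ (by norm_num [PySem.List.pyRange] at hn ⊢; omega)]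

-- ===== VERDICT (by name: the statement is the Claim_ definition above) =====
theorem n2ij_spec : Claim_equal_n2ij := by
  intro dimension n _
  unfold Spec_n2ij n2ij n2ij_alt
  by_cases h3 : dimension = 3
  · subst h3; rw [scan_eq 3 (by omega)]; norm_num
  by_cases h4 : dimension = 4
  · subst h4; rw [if_neg h3, if_pos rfl, scan_eq 4 (by omega)]; norm_num [h3]
  by_cases h5 : dimension = 5
  · subst h5; rw [if_neg h3, if_neg h4, if_pos rfl, scan_eq 5 (by omega)]; norm_num [h3, h4]
  · simp [h3, h4, h5]
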